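-- pv_equiv track=rewrite | github.com/marcelm/cutadapt | src/cutadapt/kmer_heuristic.py | kmer_chunks
-- ===== SOURCE A (Python) =====
-- from typing import List, Optional, Set, Tuple
--
-- def kmer_chunks(sequence: str, chunks: int) -> Set[str]:
--     """
--     Partition a sequence in almost equal sized chunks. Returns the shortest
--     possibility. AABCABCABC, 3 returns {"AABC", "ABC"}
--     """
--     chunk_size = len(sequence) // (chunks)
--     remainder = len(sequence) % (chunks)
--     chunk_sizes: List[int] = remainder * [chunk_size + 1] + (chunks - remainder) * [
--         chunk_size
--     ]
--     offset = 0
--     chunk_set = set()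
--     for size in chunk_sizes:
--         chunk_set.add(sequence[offset : offset + size])
--         offset += size
--     return chunk_set
-- ===== SOURCE B (Python) =====
-- def kmer_chunks(sequence, chunks):
--     """
--     Partition a sequence in almost equal sized chunks. Returns the shortest
--     possibility. AABCABCABC, 3 returns {"AABC", "ABC"}
--     """
--     chunk_size, remainder = divmod(len(sequence), chunks)
--     return {
--         sequence[i * chunk_size + min(i, remainder):
--                  (i + 1) * chunk_size + min(i + 1, remainder)]
--         for i in range(chunks)
--     }
-- ===== Notes on version B (the rewrite author's own statement) =====
-- stated objective: simpler
-- what changed: B drops the precomputed chunk_sizes list and the running offset accumulator; each chunk's boundaries are computed directly in closed form (start = i*chunk_size + min(i, remainder)) inside a set comprehension over range(chunks).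
import Mathlib
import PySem

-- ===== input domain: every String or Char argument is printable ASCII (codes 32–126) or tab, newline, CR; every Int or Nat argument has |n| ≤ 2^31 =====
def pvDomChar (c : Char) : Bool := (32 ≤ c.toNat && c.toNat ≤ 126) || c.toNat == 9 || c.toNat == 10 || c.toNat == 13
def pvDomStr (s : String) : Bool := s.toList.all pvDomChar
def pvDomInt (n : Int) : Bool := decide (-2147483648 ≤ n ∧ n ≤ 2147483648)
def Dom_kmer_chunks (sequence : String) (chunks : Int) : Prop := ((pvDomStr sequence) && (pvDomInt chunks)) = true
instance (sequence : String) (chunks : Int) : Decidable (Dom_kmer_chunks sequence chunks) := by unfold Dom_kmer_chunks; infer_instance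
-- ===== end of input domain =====

-- B replaces A's precomputed chunk_sizes list and running offset accumulator by a closed-form
-- index formula inside a set comprehension (objective: simpler).

-- ===== PORT A =====
-- the loop body of A: state is (offset, chunk_set); add the slice, then advance the offset
def stepA (sequence : String) (st : Int × PySem.Set String) (size : Int) : Int × PySem.Set String :=
  (st.1 + size, PySem.Set.add st.2 (PySem.Str.slice sequence (some st.1) (some (st.1 + size))))

def kmer_chunks (sequence : String) (chunks : Int) : List String :=
  let chunk_size : Int := PySem.Int.floordiv (PySem.Str.len sequence) chunks
  let remainder : Int := PySem.Int.mod (PySem.Str.len sequence) chunks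
  let chunk_sizes : List Int :=
    List.replicate remainder.toNat (chunk_size + 1) ++ List.replicate (chunks - remainder).toNat chunk_size
  (chunk_sizes.foldl (stepA sequence) (0, PySem.Set.empty)).2

-- ===== PORT B =====
-- the comprehension body of B: add the slice with closed-form bounds for chunk i
def stepB (sequence : String) (q r : Int) (s : PySem.Set String) (i : Int) : PySem.Set String :=
  PySem.Set.add s (PySem.Str.slice sequence (some (i * q + min i r)) (some ((i + 1) * q + min (i + 1) r)))

def kmer_chunks_alt (sequence : String) (chunks : Int) : List String :=
  match PySem.Int.divmod? (PySem.Str.len sequence) chunks with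
  | none => []  -- chunks = 0: Python raises ZeroDivisionError; excluded by Pre_
  | some (q, r) =>
    (PySem.List.pyRange 0 chunks 1).foldl (stepB sequence q r) PySem.Set.empty

-- ===== PRECONDITION & SPEC =====
-- Pre_ excludes only chunks = 0, where both Pythons raise ZeroDivisionError.
def Pre_kmer_chunks (sequence : String) (chunks : Int) : Prop := chunks ≠ 0
instance (sequence : String) (chunks : Int) : Decidable (Pre_kmer_chunks sequence chunks) := by
  unfold Pre_kmer_chunks; infer_instance

def pvWitness_kmer_chunks : String × Int := ("AABCABCABC", 3)

def Spec_kmer_chunks (sequence : String) (chunks : Int) (out : List String) : Prop := out = kmer_chunks_alt sequence chunks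
instance (sequence : String) (chunks : Int) (out : List String) : Decidable (Spec_kmer_chunks sequence chunks out) := by unfold Spec_kmer_chunks; infer_instance

-- ===== CLAIM (what is proved, stated in full; the proofs are below) =====
def Claim_equal_kmer_chunks : Prop := ∀ (sequence : String) (chunks : Int), Dom_kmer_chunks sequence chunks → Pre_kmer_chunks sequence chunks → Spec_kmer_chunks sequence chunks (kmer_chunks sequence chunks)

-- ===== LEMMAS AND PROOFS =====
-- A's remaining chunk_sizes list when the first k chunks have been consumed
def sizesFrom (chunks q r k : Int) : List Int :=
  List.replicate (r - k).toNat (q + 1) ++ List.replicate (chunks - max k r).toNat q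

-- loop invariant: after k chunks, A's offset is k*q + min k r, and the remaining
-- folds of A (over sizesFrom) and B (over pyRange k chunks 1) build the same set
lemma fold_eq (sequence : String) (chunks q r : Int) (hr : r < chunks) :
    ∀ (m : Nat) (k : Int) (s : PySem.Set String), 0 ≤ k → k ≤ chunks → m = (chunks - k).toNat →
      ((sizesFrom chunks q r k).foldl (stepA sequence) (k * q + min k r, s)).2
        = (PySem.List.pyRange k chunks 1).foldl (stepB sequence q r) s := by
  intro m
  induction m with
  | zero =>
    intro k s hk0 hk hm
    have hkc : k = chunks := by omega
    subst hkc
    have h1 : (r - k).toNat = 0 := by omega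
    have h2 : (k - max k r).toNat = 0 := by omega
    rw [PySem.List.pyRange_one_eq_nil le_rfl]
    simp [sizesFrom, h1, h2]
  | succ m ih =>
    intro k s hk0 hk hm
    have hkc : k < chunks := by omega
    rw [PySem.List.pyRange_one_cons hkc, List.foldl_cons]
    by_cases hkr : k < r
    · -- big chunk: size q + 1
      have h1 : (r - k).toNat = (r - (k + 1)).toNat + 1 := by omega
      have hmin : min k r = k := by omega
      have hmin' : min (k + 1) r = k + 1 := by omega
      have hmax' : max (k + 1) r = r := by omega
      have he : k * q + min k r + (q + 1) = (k + 1) * q + min (k + 1) r := by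
        rw [hmin, hmin']; ring
      have hst : stepA sequence (k * q + min k r, s) (q + 1)
          = ((k + 1) * q + min (k + 1) r, stepB sequence q r s k) := by
        simp only [stepA, stepB, he]
      rw [sizesFrom, h1, List.replicate_succ]
      simp only [List.cons_append, List.foldl_cons]
      rw [hst]
      have := ih (k + 1) (stepB sequence q r s k) (by omega) (by omega) (by omega)
      simp only [sizesFrom, hmax', show max k r = r by omega] at this ⊢
      exact this
    · -- small chunk: size q
      have h1 : (r - k).toNat = 0 := by omega
      have h1' : (r - (k + 1)).toNat = 0 := by omega
      have hmax : max k r = k := by omega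
      have hmax' : max (k + 1) r = k + 1 := by omega
      have h2 : (chunks - k).toNat = (chunks - (k + 1)).toNat + 1 := by omega
      have hmin : min k r = r := by omega
      have hmin' : min (k + 1) r = r := by omega
      have he : k * q + min k r + q = (k + 1) * q + min (k + 1) r := by
        rw [hmin, hmin']; ring
      have hst : stepA sequence (k * q + min k r, s) q
          = ((k + 1) * q + min (k + 1) r, stepB sequence q r s k) := by
        simp only [stepA, stepB, he]
      rw [sizesFrom, h1, hmax, h2, List.replicate_succ]
      simp only [List.replicate_zero, List.nil_append, List.foldl_cons]
      rw [hst]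
      have := ih (k + 1) (stepB sequence q r s k) (by omega) (by omega) (by omega)
      simp only [sizesFrom, h1', hmax', List.replicate_zero, List.nil_append] at this
      exact this

-- ===== VERDICT (by name: the statement is the Claim_ definition above) =====
theorem kmer_chunks_spec : Claim_equal_kmer_chunks := by
  intro sequence chunks _ hpre
  unfold Spec_kmer_chunks kmer_chunks kmer_chunks_alt
  have hne : chunks ≠ 0 := hpre
  have hdm : PySem.Int.divmod? (PySem.Str.len sequence) chunks
      = some (PySem.Int.floordiv (PySem.Str.len sequence) chunks,
              PySem.Int.mod (PySem.Str.len sequence) chunks) := by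
    simp [PySem.Int.divmod?, PySem.Int.floordiv, PySem.Int.mod, hne]
  rw [hdm]
  set n : Int := PySem.Str.len sequence with hn
  set q : Int := PySem.Int.floordiv n chunks with hq
  set r : Int := PySem.Int.mod n chunks with hrdef
  rcases lt_or_gt_of_ne hne with hneg | hpos
  · -- chunks < 0: both sides are the empty set
    have hemod := Int.emod_nonneg n hne
    have hlt : n % chunks < -chunks := by
      rw [← Int.emod_neg]; exact Int.emod_lt_of_pos n (by omega)
    have hf : r = n % chunks + if 0 ≤ chunks ∨ chunks ∣ n then 0 else chunks := by
      rw [hrdef]; unfold PySem.Int.mod; exact Int.fmod_eq_emod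
    have hr : r ≤ 0 ∧ chunks < r := by
      by_cases hd : chunks ∣ n
      · have h0 : n % chunks = 0 := Int.emod_eq_zero_of_dvd hd
        rw [hf]; simp [hd, h0]; omega
      · rw [hf]; simp [hd, show ¬ (0 ≤ chunks) by omega]; omega
    have h1 : r.toNat = 0 := by omega
    have h2 : (chunks - r).toNat = 0 := by omega
    rw [PySem.List.pyRange_one_eq_nil (by omega)]
    simp [h1, h2]
  · -- chunks > 0
    have hre : r = n % chunks := by rw [hrdef]; exact PySem.Int.mod_eq_emod_of_pos hpos
    have hr0 : 0 ≤ r := by rw [hre]; exact Int.emod_nonneg n hne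
    have hrlt : r < chunks := by rw [hre]; exact Int.emod_lt_of_pos n hpos
    have := fold_eq sequence chunks q r hrlt (chunks - 0).toNat 0 PySem.Set.empty le_rfl (by omega) rfl
    have hstart : (0 : Int) * q + min 0 r = 0 := by omega
    rw [hstart] at this
    simp only [sizesFrom, show ((0:Int) ⊔ r) = r by omega, Int.sub_zero] at this ⊢
    exact this
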